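-- pv_equiv track=rewrite | github.com/Al-Amin134/Digital-Signal-Processing | 08 six_point_averaging and differencing.py | six_point_deferencing
-- ===== SOURCE A (Python) =====
-- def six_point_deferencing(x):
--
--     y = []
--     x_len = len(x)
--     for n in range(x_len):
--        if(n-6>=0):
--          y.append(x[n]-x[n-6])
--        else:
--           y.append(0)
--     return y
-- ===== SOURCE B (Python) =====
-- def six_point_deferencing(x):
--     q = []  # FIFO of the last up-to-6 samples seen
--     y = []
--     for v in x:
--         if len(q) == 6:
--             y.append(v - q.pop(0))
--         else:
--             y.append(0)
--         q.append(v)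
--     return y
-- ===== Notes on version B (the rewrite author's own statement) =====
-- stated objective: alternative
-- what changed: Replaced A's random-access index loop (x[n]-x[n-6] with a per-index bounds test) by a streaming pass that never indexes the list: a FIFO queue holds the last six samples, emitting 0 while the queue is filling and v - q.pop(0) once it is full.
import Mathlib
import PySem

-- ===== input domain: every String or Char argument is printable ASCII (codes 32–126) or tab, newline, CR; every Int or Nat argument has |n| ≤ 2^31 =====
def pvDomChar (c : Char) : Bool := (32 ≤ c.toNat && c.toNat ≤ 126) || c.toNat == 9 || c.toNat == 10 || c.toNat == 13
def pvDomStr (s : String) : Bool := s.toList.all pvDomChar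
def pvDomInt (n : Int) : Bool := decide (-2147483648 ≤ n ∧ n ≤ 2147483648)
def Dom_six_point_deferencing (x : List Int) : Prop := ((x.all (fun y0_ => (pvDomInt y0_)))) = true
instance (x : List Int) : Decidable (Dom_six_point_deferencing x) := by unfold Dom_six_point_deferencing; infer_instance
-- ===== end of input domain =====

-- B replaces A's random-access index loop by a streaming pass over the values with a
-- six-element FIFO queue, never indexing the list (objective: alternative).

-- ===== PORT A =====
-- A: for n in range(len(x)): append x[n]-x[n-6] if n-6>=0 else 0.  Indices are always
-- in range when the guard holds, so the pyGetD default 0 is never used.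
def six_point_deferencing (x : List Int) : List Int :=
  (PySem.List.pyRange 0 (x.length : Int) 1).foldl
    (fun y n =>
      if n - 6 ≥ 0 then y ++ [PySem.List.pyGetD x n 0 - PySem.List.pyGetD x (n - 6) 0]
      else y ++ [0])
    []

-- ===== PORT B =====
-- B: stream over x keeping a FIFO q of the last ≤ 6 samples; when q is full emit
-- v - q.pop(0), else emit 0, then push v.  q.pop(0) is PySem.List.pop? q 0; the none
-- case is unreachable since the branch holds only when q has six elements.
def six_point_deferencing_alt (x : List Int) : List Int :=
  (x.foldl
    (fun (st : List Int × List Int) v =>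
      if st.1.length == 6 then
        match PySem.List.pop? st.1 0 with
        | some (h, t) => (t ++ [v], st.2 ++ [v - h])
        | none => (st.1 ++ [v], st.2)
      else (st.1 ++ [v], st.2 ++ [0]))
    ([], [])).2

-- ===== PRECONDITION & SPEC =====
def Spec_six_point_deferencing (x : List Int) (out : List Int) : Prop := out = six_point_deferencing_alt x
instance (x : List Int) (out : List Int) : Decidable (Spec_six_point_deferencing x out) := by unfold Spec_six_point_deferencing; infer_instance

-- ===== CLAIM =====
def Claim_equal_six_point_deferencing : Prop := ∀ (x : List Int), Dom_six_point_deferencing x → Spec_six_point_deferencing x (six_point_deferencing x)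

-- ===== LEMMAS AND PROOFS =====

theorem six_point_deferencing_eq_map (x : List Int) :
    six_point_deferencing x =
      (List.range x.length).map
        (fun (k : Nat) => if (k : Int) - 6 ≥ 0 then
            PySem.List.pyGetD x (k : Int) 0 - PySem.List.pyGetD x ((k : Int) - 6) 0
          else 0) := by
  unfold six_point_deferencing
  rw [show (fun (y : List Int) (n : Int) =>
      if n - 6 ≥ 0 then y ++ [PySem.List.pyGetD x n 0 - PySem.List.pyGetD x (n - 6) 0]
      else y ++ [0]) =
      (fun y n => y ++ [if n - 6 ≥ 0 then
        PySem.List.pyGetD x n 0 - PySem.List.pyGetD x (n - 6) 0 else 0]) by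
    funext y n; split <;> rfl]
  rw [PySem.List.foldl_append_singleton_eq_map, PySem.List.pyRange_one, List.map_map]
  simp

-- The streaming fold, characterised in closed form: starting from queue q (≤ 6 long)
-- and output y, the output grows by zeros while the queue fills, then by lag-6
-- differences; the popped elements are exactly q followed by the inputs in order.
theorem alt_fold_char (x : List Int) : ∀ (q y : List Int), q.length ≤ 6 →
    (x.foldl
      (fun (st : List Int × List Int) v =>
        if st.1.length == 6 then
          match PySem.List.pop? st.1 0 with
          | some (h, t) => (t ++ [v], st.2 ++ [v - h])
          | none => (st.1 ++ [v], st.2)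
        else (st.1 ++ [v], st.2 ++ [0]))
      (q, y)).2 =
    y ++ List.replicate (min (6 - q.length) x.length) 0 ++
      List.zipWith (· - ·) (x.drop (6 - q.length)) (q ++ x) := by
  induction x with
  | nil => intro q y _; simp
  | cons v rest ih =>
    intro q y hq
    by_cases h6 : q.length = 6
    · obtain ⟨h, t, rfl⟩ : ∃ h t, q = h :: t := by
        cases q with
        | nil => simp at h6
        | cons a b => exact ⟨a, b, rfl⟩
      simp only [List.foldl_cons, h6]
      rw [if_pos (by simp), PySem.List.pop?_zero_cons]
      rw [ih (t ++ [v]) (y ++ [v - h]) (by simp at h6 ⊢; omega)]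
      have ht : t.length = 5 := by simpa using h6
      simp [ht, List.append_assoc]
    · have hlt : q.length < 6 := lt_of_le_of_ne hq h6
      simp only [List.foldl_cons]
      rw [if_neg (by simp [h6])]
      rw [ih (q ++ [v]) (y ++ [0]) (by simp; omega)]
      have h1 : 6 - (q ++ [v]).length = 5 - q.length := by
        simp only [List.length_append, List.length_cons, List.length_nil]; omega
      have h2 : (v :: rest).drop (6 - q.length) = rest.drop (5 - q.length) := by
        have : 6 - q.length = (5 - q.length) + 1 := by omega
        rw [this]; rfl
      have h3 : min (6 - q.length) (v :: rest).length
          = min (5 - q.length) rest.length + 1 := by simp; omega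
      rw [h1, h2, h3]
      simp [List.replicate_succ, List.append_assoc]

theorem alt_eq_closed (x : List Int) :
    six_point_deferencing_alt x =
      List.replicate (min 6 x.length) 0 ++
        List.zipWith (· - ·) (x.drop 6) x := by
  unfold six_point_deferencing_alt
  rw [alt_fold_char x [] [] (by simp)]
  simp

-- ===== VERDICT =====
theorem six_point_deferencing_spec : Claim_equal_six_point_deferencing := by
  intro x _
  show six_point_deferencing x = six_point_deferencing_alt x
  rw [six_point_deferencing_eq_map, alt_eq_closed]
  apply List.ext_getElem
  · simp [List.length_zipWith]; omega
  · intro k hk hk'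
    simp only [List.length_map, List.length_range] at hk
    rw [List.getElem_map]
    by_cases h6 : k < 6
    · rw [List.getElem_append_left (by simp; omega)]
      simp only [List.getElem_range, List.getElem_replicate]
      rw [if_neg (by omega)]
    · have hx6 : 6 ≤ x.length := by omega
      rw [List.getElem_append_right (by simp; omega)]
      simp only [List.getElem_range, List.length_replicate, List.getElem_zipWith]
      have hmin : min 6 x.length = 6 := by omega
      rw [if_pos (by omega)]
      rw [PySem.List.pyGetD_natCast]
      have : (k : Int) - 6 = ((k - 6 : Nat) : Int) := by omega
      rw [this, PySem.List.pyGetD_natCast]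
      simp only [List.getElem_drop]
      congr 1 <;> rw [List.getD_eq_getElem] <;> congr 1 <;> omega
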